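-- pv_equiv track=rewrite | github.com/Ali-Al-Hadi-Al-Husseini/AEH_Encryption | incomplete/matrix.py | convert_to_matrix
-- ===== SOURCE A (Python) =====
-- def convert_to_matrix(txt):
--     mat = [
--         [],
--         [],
--         [],
--         []
--     ]
--     row = 0
--     for char in txt :
--         if len(mat[row]) >= 4:
--             row += 1
--         mat[row].append(char)
--
--
--     return mat
-- ===== SOURCE B (Python) =====
-- def convert_to_matrix(txt):
--     return [list(txt[4 * r:4 * r + 4]) for r in range(4)]
-- ===== Notes on version B (the rewrite author's own statement) =====
-- stated objective: simpler
-- what changed: Replaces A's per-character loop with stateful row counter and overflow branch by building the four rows directly as slices txt[4r:4r+4] for r in range(4), with no per-character iteration at all.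
import Mathlib
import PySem

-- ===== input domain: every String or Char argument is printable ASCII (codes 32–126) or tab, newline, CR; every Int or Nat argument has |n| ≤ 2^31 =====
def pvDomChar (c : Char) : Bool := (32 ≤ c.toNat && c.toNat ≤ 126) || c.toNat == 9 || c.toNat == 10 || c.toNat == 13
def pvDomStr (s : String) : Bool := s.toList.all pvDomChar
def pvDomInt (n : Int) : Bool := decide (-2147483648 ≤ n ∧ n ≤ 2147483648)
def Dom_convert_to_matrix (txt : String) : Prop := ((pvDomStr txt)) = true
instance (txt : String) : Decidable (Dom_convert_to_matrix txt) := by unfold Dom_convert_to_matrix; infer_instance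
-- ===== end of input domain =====

-- B builds the four rows directly as slices txt[4r:4r+4] for r in range(4), replacing
-- A's per-character loop with its stateful row counter and overflow branch (objective: simpler).

-- ===== PORT A =====
-- A's mat[row] read and in-place append are ported with getD/set over the matrix list;
-- this is exact whenever row is in range, which Pre_ (len ≤ 16) guarantees — beyond 16
-- characters Python raises IndexError and those inputs are excluded by Pre_.
def convert_to_matrix (txt : String) : List (List String) :=
  (txt.toList.foldl
    (fun (st : List (List String) × Nat) c =>
      let row := if 4 ≤ (st.1.getD st.2 []).length then st.2 + 1 else st.2
      (st.1.set row ((st.1.getD row []) ++ [c.toString]), row))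
    ([[], [], [], []], 0)).1

-- ===== PORT B =====
-- the list comprehension over range(4) is pyRange 0 4 1, each slice txt[4r:4r+4] is
-- PySem.List.slice on the character list; list(...) of a string is the map to
-- single-character strings.
def convert_to_matrix_alt (txt : String) : List (List String) :=
  (PySem.List.pyRange 0 4 1).map fun r =>
    (PySem.List.slice txt.toList (some (4 * r)) (some (4 * r + 4))).map Char.toString

-- ===== PRECONDITION & SPEC =====
-- Pre_ excludes strings longer than 16 characters, on which A raises IndexError
-- (row runs past the four rows); B returns the four full rows there (see Raises_ below).
def Pre_convert_to_matrix (txt : String) : Prop := txt.toList.length ≤ 16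
instance (txt : String) : Decidable (Pre_convert_to_matrix txt) := by
  unfold Pre_convert_to_matrix; infer_instance
def pvWitness_convert_to_matrix : String := "abcde"

def Spec_convert_to_matrix (txt : String) (out : List (List String)) : Prop := out = convert_to_matrix_alt txt
instance (txt : String) (out : List (List String)) : Decidable (Spec_convert_to_matrix txt out) := by unfold Spec_convert_to_matrix; infer_instance

-- ===== CLAIM (what is proved, stated in full; the proofs are below) =====
def Claim_equal_convert_to_matrix : Prop := ∀ (txt : String), Dom_convert_to_matrix txt → Pre_convert_to_matrix txt → Spec_convert_to_matrix txt (convert_to_matrix txt)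

-- ===== LEMMAS AND PROOFS =====

-- The intended 4×4 grouping: row j holds the characters with indices 4j … 4j+3.
def rowsOf (m : List String) : List (List String) :=
  [m.take 4, (m.drop 4).take 4, (m.drop 8).take 4, (m.drop 12).take 4]

-- Appending one element to row (length m / 4) extends the grouping by one character.
theorem core_step (m : List String) (s : String) (h : m.length ≤ 15) :
    (rowsOf m).set (m.length / 4) (((rowsOf m).getD (m.length / 4) []) ++ [s])
      = rowsOf (m ++ [s]) := by
  interval_cases h' : m.length <;>
    simp_all [rowsOf, List.take_append_of_le_length, List.drop_append_of_le_length,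
      List.length_drop, List.take_of_length_le, List.drop_of_length_le]

-- Invariant of A's fold: after n ≤ 16 characters, mat is the grouping and row = (n-1)/4.
theorem a_inv (l : List Char) (h : l.length ≤ 16) :
    l.foldl
      (fun (st : List (List String) × Nat) c =>
        let row := if 4 ≤ (st.1.getD st.2 []).length then st.2 + 1 else st.2
        (st.1.set row ((st.1.getD row []) ++ [c.toString]), row))
      ([[], [], [], []], 0)
    = (rowsOf (l.map Char.toString), (l.length - 1) / 4) := by
  induction l using List.reverseRecOn with
  | nil => simp [rowsOf]
  | append_singleton l c ih =>
    have hl15 : l.length ≤ 15 := by simp at h; omega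
    rw [List.foldl_append, ih (by omega)]
    simp only [List.foldl_cons, List.foldl_nil]
    have hmlen : (l.map Char.toString).length = l.length := by simp
    have hget : ((rowsOf (l.map Char.toString)).getD ((l.length - 1) / 4) []).length
        = min 4 (l.length - 4 * ((l.length - 1) / 4)) := by
      have h4 : (l.length - 1) / 4 ≤ 3 := by omega
      interval_cases hh : (l.length - 1) / 4 <;>
        simp [rowsOf, hmlen]
    have hrow : (if 4 ≤ ((rowsOf (l.map Char.toString)).getD ((l.length - 1) / 4) []).length
        then (l.length - 1) / 4 + 1 else (l.length - 1) / 4) = l.length / 4 := by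
      rw [hget]; split_ifs <;> omega
    simp only [hrow]
    have hc := core_step (l.map Char.toString) c.toString (by rw [hmlen]; omega)
    rw [hmlen] at hc
    simp only [List.map_append, List.map_cons, List.map_nil, Prod.mk.injEq]
    refine ⟨by simpa using hc, by simp⟩

-- Each slice txt[4j:4j+4] is drop-then-take on the character list.
theorem slice4 (l : List Char) (j : Nat) :
    PySem.List.slice l (some (4 * (j : Int))) (some (4 * (j : Int) + 4))
      = (l.drop (4 * j)).take 4 := by
  have := PySem.List.slice_natCast_add l (4 * j) 4
  push_cast at this ⊢
  convert this using 3

-- B computes the grouping directly: its four slices are exactly the rows of rowsOf.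
theorem b_eq (txt : String) :
    convert_to_matrix_alt txt = rowsOf (txt.toList.map Char.toString) := by
  unfold convert_to_matrix_alt rowsOf
  have h : PySem.List.pyRange 0 4 1 = [0, 1, 2, 3] := by decide
  rw [h]
  simp only [List.map]
  rw [show (0 : Int) = ((0 : Nat) : Int) by norm_num,
      show (1 : Int) = ((1 : Nat) : Int) by norm_num,
      show (2 : Int) = ((2 : Nat) : Int) by norm_num,
      show (3 : Int) = ((3 : Nat) : Int) by norm_num]
  rw [slice4, slice4, slice4, slice4]
  simp [List.map_drop, List.map_take]

-- ===== VERDICT (by name: the statement is the Claim_ definition above) =====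
theorem convert_to_matrix_spec : Claim_equal_convert_to_matrix := by
  intro txt _ hpre
  unfold Spec_convert_to_matrix convert_to_matrix
  rw [a_inv txt.toList hpre, b_eq txt]
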